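-- pv_equiv track=rewrite | github.com/helsonzhao/SkillsForAndroidPerformance | skills/diff-apks/apk_deep_analyzer.py | consolidate_categories
-- ===== SOURCE A (Python) =====
-- def consolidate_categories(category_sizes, category_files, category_packages):
--     """Aggregates small 'Unclassified Classes: ...' items into a single misc category."""
--     new_sizes = category_sizes.copy()
--     new_files = category_files.copy()
--     new_packages = category_packages.copy()
--
--     threshold = 10 * 1024  # 10 KB
--     misc_cat = "Unclassified Classes (tail)"
--
--     keys = list(new_sizes.keys())
--     for cat in keys:
--         if cat.startswith("Unclassified Classes:"):
--             size = new_sizes[cat]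
--             if size < threshold:
--                 new_sizes[misc_cat] = new_sizes.get(misc_cat, 0) + size
--                 new_files[misc_cat] = new_files.get(misc_cat, 0) + new_files[cat]
--                 del new_sizes[cat]
--                 del new_files[cat]
--                 if cat in new_packages:
--                     del new_packages[cat]
--
--     return new_sizes, new_files, new_packages
-- ===== SOURCE B (Python) =====
-- def consolidate_categories(category_sizes, category_files, category_packages):
--     """Aggregates small 'Unclassified Classes: ...' items into a single misc category."""
--     threshold = 10 * 1024
--     misc_cat = "Unclassified Classes (tail)"
--     merge = [k for k, v in category_sizes.items()
--              if k.startswith("Unclassified Classes:") and v < threshold]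
--     drop = set(merge)
--     new_sizes = {k: v for k, v in category_sizes.items() if k not in drop}
--     new_files = {k: v for k, v in category_files.items() if k not in drop}
--     new_packages = {k: v for k, v in category_packages.items() if k not in drop}
--     if merge:
--         new_sizes[misc_cat] = new_sizes.get(misc_cat, 0) + sum(category_sizes[k] for k in merge)
--         new_files[misc_cat] = new_files.get(misc_cat, 0) + sum(category_files[k] for k in merge)
--     return new_sizes, new_files, new_packages
-- ===== Notes on version B (the rewrite author's own statement) =====
-- stated objective: simpler
-- what changed: B replaces A's mutate-while-iterating loop (snapshot of keys, per-key get/insert/delete on dict copies) with a single upfront computation of the merge key list, comprehension rebuilds of the three dicts that drop those keys, and one summed update of the misc bucket.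
import Mathlib
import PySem

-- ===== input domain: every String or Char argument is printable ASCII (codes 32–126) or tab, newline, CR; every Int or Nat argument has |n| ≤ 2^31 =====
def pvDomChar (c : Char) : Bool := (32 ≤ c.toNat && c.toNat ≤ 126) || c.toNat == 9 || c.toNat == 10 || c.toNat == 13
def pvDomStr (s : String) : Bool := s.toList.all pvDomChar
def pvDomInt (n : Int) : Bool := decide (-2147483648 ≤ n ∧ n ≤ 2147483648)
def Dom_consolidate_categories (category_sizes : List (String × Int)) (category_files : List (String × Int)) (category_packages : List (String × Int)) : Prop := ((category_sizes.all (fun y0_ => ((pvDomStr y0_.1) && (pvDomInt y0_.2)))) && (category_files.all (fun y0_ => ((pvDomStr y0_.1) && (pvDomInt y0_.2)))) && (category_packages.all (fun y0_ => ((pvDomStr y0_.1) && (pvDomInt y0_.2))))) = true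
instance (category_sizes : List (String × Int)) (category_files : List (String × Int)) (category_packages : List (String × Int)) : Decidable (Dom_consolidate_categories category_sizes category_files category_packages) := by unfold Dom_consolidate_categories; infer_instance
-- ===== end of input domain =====

-- B rewrites A's mutate-as-you-iterate loop as: compute the merge key set once, drop those keys
-- from all three dicts by comprehension, then add the two sums into the misc bucket (objective:
-- simpler — no in-place deletion while iterating a key snapshot).

-- ===== PORT A =====
-- loop body of A: one iteration over a key from the snapshot of new_sizes' keys
def pvStepA (st : PySem.Dict String Int × PySem.Dict String Int × PySem.Dict String Int)
    (cat : String) : PySem.Dict String Int × PySem.Dict String Int × PySem.Dict String Int :=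
  if PySem.Str.startswith cat "Unclassified Classes:" then
    match PySem.Dict.get? st.1 cat with
    | none => st        -- new_sizes[cat] KeyError (only reachable for duplicate keys; outside Pre_)
    | some size =>
      if size < 10240 then
        match PySem.Dict.get? st.2.1 cat with
        | none => st    -- new_files[cat] KeyError; outside Pre_
        | some fc =>
          ((st.1.insert "Unclassified Classes (tail)" (st.1.getD "Unclassified Classes (tail)" 0 + size)).erase cat,
           (st.2.1.insert "Unclassified Classes (tail)" (st.2.1.getD "Unclassified Classes (tail)" 0 + fc)).erase cat,
           if st.2.2.contains cat then st.2.2.erase cat else st.2.2)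
      else st
  else st

def consolidate_categories (category_sizes : List (String × Int)) (category_files : List (String × Int)) (category_packages : List (String × Int)) : (List (String × Int)) × (List (String × Int)) × (List (String × Int)) :=
  let r := (PySem.Dict.keys (PySem.Dict.mk category_sizes)).foldl pvStepA
      (PySem.Dict.mk category_sizes, PySem.Dict.mk category_files, PySem.Dict.mk category_packages)
  (r.1.items, r.2.1.items, r.2.2.items)

-- ===== PORT B =====
-- the keys B merges away: small 'Unclassified Classes: …' entries
def pvIsSmallUC (kv : String × Int) : Bool :=
  PySem.Str.startswith kv.1 "Unclassified Classes:" && kv.2 < 10240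

def consolidate_categories_alt (category_sizes : List (String × Int)) (category_files : List (String × Int)) (category_packages : List (String × Int)) : (List (String × Int)) × (List (String × Int)) × (List (String × Int)) :=
  let merge := (category_sizes.filter pvIsSmallUC).map Prod.fst
  let ns := PySem.Dict.mk (category_sizes.filter (fun kv => !(merge.contains kv.1)))
  let nf := PySem.Dict.mk (category_files.filter (fun kv => !(merge.contains kv.1)))
  let np := category_packages.filter (fun kv => !(merge.contains kv.1))
  if merge.isEmpty then (ns.items, nf.items, np)
  else
    let ts := (merge.map (fun k => PySem.Dict.getD (PySem.Dict.mk category_sizes) k 0)).sum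
    let tf := (merge.map (fun k => PySem.Dict.getD (PySem.Dict.mk category_files) k 0)).sum
    ((ns.insert "Unclassified Classes (tail)" (ns.getD "Unclassified Classes (tail)" 0 + ts)).items,
     (nf.insert "Unclassified Classes (tail)" (nf.getD "Unclassified Classes (tail)" 0 + tf)).items,
     np)

-- ===== PRECONDITION & SPEC =====
-- Pre_ excludes association lists with duplicate keys (not valid encodings of the Python dict
-- arguments) and inputs where some merged key of category_sizes is missing from category_files,
-- on which Python A (and B alike) raises KeyError.
def Pre_consolidate_categories (category_sizes : List (String × Int)) (category_files : List (String × Int)) (category_packages : List (String × Int)) : Prop :=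
  (category_sizes.map Prod.fst).Nodup ∧ (category_files.map Prod.fst).Nodup ∧
  (category_packages.map Prod.fst).Nodup ∧
  ∀ kv ∈ category_sizes,
    (PySem.Str.startswith kv.1 "Unclassified Classes:" && kv.2 < 10240) = true →
    kv.1 ∈ category_files.map Prod.fst
instance (category_sizes : List (String × Int)) (category_files : List (String × Int)) (category_packages : List (String × Int)) : Decidable (Pre_consolidate_categories category_sizes category_files category_packages) := by unfold Pre_consolidate_categories; infer_instance

def pvWitness_consolidate_categories : (List (String × Int)) × (List (String × Int)) × (List (String × Int)) :=
  ([("Unclassified Classes: a", 5), ("Main", 99999)],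
   [("Unclassified Classes: a", 2), ("Main", 4)],
   [("Main", 1)])

def Spec_consolidate_categories (category_sizes : List (String × Int)) (category_files : List (String × Int)) (category_packages : List (String × Int)) (out : (List (String × Int)) × (List (String × Int)) × (List (String × Int))) : Prop := out = consolidate_categories_alt category_sizes category_files category_packages
instance (category_sizes : List (String × Int)) (category_files : List (String × Int)) (category_packages : List (String × Int)) (out : (List (String × Int)) × (List (String × Int)) × (List (String × Int))) : Decidable (Spec_consolidate_categories category_sizes category_files category_packages out) := by unfold Spec_consolidate_categories; infer_instance

-- ===== CLAIM (what is proved, stated in full; the proofs are below) =====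
def Claim_equal_consolidate_categories : Prop := ∀ (category_sizes : List (String × Int)) (category_files : List (String × Int)) (category_packages : List (String × Int)), Dom_consolidate_categories category_sizes category_files category_packages → Pre_consolidate_categories category_sizes category_files category_packages → Spec_consolidate_categories category_sizes category_files category_packages (consolidate_categories category_sizes category_files category_packages)

-- ===== LEMMAS AND PROOFS =====

def pvMisc : String := "Unclassified Classes (tail)"

-- value-bump applied to the misc entry in the canonical result form
def pvBump (T : Int) (p : String × Int) : String × Int :=
  if p.1 = pvMisc then (pvMisc, p.2 + T) else p

-- the merge decision A takes for a key, read off the ORIGINAL sizes dict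
def pvPM (ds : PySem.Dict String Int) (k : String) : Bool :=
  PySem.Str.startswith k "Unclassified Classes:" && ((ds.get? k).elim false (fun v => decide (v < 10240)))

theorem pv_uc_ne_misc {a : String}
    (h : PySem.Str.startswith a "Unclassified Classes:" = true) : a ≠ pvMisc := by
  intro heq
  subst heq
  exact absurd h (by decide)

theorem pv_get?_erase_of_ne {d : PySem.Dict String Int} {k k' : String} (h : k' ≠ k) :
    (d.erase k).get? k' = d.get? k' := by
  simp only [PySem.Dict.erase, PySem.Dict.get?, List.find?_filter]
  have : (fun (a : String × Int) => decide ((!a.1 == k) = true ∧ (a.1 == k') = true))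
       = (fun p => p.1 == k') := by
    funext a
    by_cases ha : a.1 = k' <;> simp [ha, h]
  rw [this]

theorem pv_contains_erase_of_ne {d : PySem.Dict String Int} {k k' : String} (h : k' ≠ k) :
    (d.erase k).contains k' = d.contains k' := by
  rw [PySem.Dict.contains_eq_isSome_get?, PySem.Dict.contains_eq_isSome_get?,
    pv_get?_erase_of_ne h]

theorem pv_nodup_keys_erase {d : PySem.Dict String Int} {k : String} (h : d.keys.Nodup) :
    (d.erase k).keys.Nodup := by
  obtain ⟨l⟩ := d
  simp only [PySem.Dict.erase, PySem.Dict.keys] at *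
  exact ((List.filter_sublist (l := l)).map (fun x => x.1)).nodup h

theorem pv_not_contains_key {d : PySem.Dict String Int} (hc : d.contains pvMisc = false) :
    ∀ p ∈ d.items, p.1 ≠ pvMisc := by
  intro p hp hpm
  have : d.contains pvMisc = true := by
    simp only [PySem.Dict.contains, List.any_eq_true]
    exact ⟨p, hp, by simp [hpm]⟩
  rw [this] at hc; cases hc

-- A's loop over the key snapshot, characterised as three independent folds over the merged keys
theorem pv_loopA (ds df : PySem.Dict String Int) (ks : List String)
    (ns nf np : PySem.Dict String Int)
    (hnd : ks.Nodup)
    (hs : ∀ k ∈ ks, PySem.Str.startswith k "Unclassified Classes:" = true →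
      ns.get? k = ds.get? k ∧ nf.get? k = df.get? k)
    (hf : ∀ k ∈ ks, pvPM ds k = true → (df.get? k).isSome) :
    ks.foldl pvStepA (ns, nf, np) =
      ((ks.filter (pvPM ds)).foldl (fun d k => (d.insert pvMisc (d.getD pvMisc 0 + ds.getD k 0)).erase k) ns,
       (ks.filter (pvPM ds)).foldl (fun d k => (d.insert pvMisc (d.getD pvMisc 0 + df.getD k 0)).erase k) nf,
       (ks.filter (pvPM ds)).foldl (fun d k => if d.contains k then d.erase k else d) np) := by
  induction ks generalizing ns nf np with
  | nil => rfl
  | cons k ks' ih =>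
    rw [List.foldl_cons]
    by_cases hsw : PySem.Str.startswith k "Unclassified Classes:" = true
    · have hswc := hsw
      simp at hswc
      obtain ⟨h1, h2⟩ := hs k (by simp) hsw
      have hkm : k ≠ pvMisc := pv_uc_ne_misc hsw
      cases hget : ds.get? k with
      | none =>
        have hstep : pvStepA (ns, nf, np) k = (ns, nf, np) := by
          simp [pvStepA, hsw, hswc, h1, hget]
        have hpm : pvPM ds k = false := by simp [pvPM, hget]
        rw [hstep, List.filter_cons_of_neg (by simp [hpm])]
        exact ih ns nf np (List.Nodup.of_cons hnd)
          (fun a ha hb => hs a (List.mem_cons_of_mem _ ha) hb)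
          (fun a ha hb => hf a (List.mem_cons_of_mem _ ha) hb)
      | some v =>
        by_cases hv : v < 10240
        · have hpm : pvPM ds k = true := by simp [pvPM, hsw, hswc, hget, hv]
          have hfs : (df.get? k).isSome := hf k (by simp) hpm
          obtain ⟨fc, hfc⟩ : ∃ fc, df.get? k = some fc := by
            cases hdf : df.get? k with
            | none => rw [hdf] at hfs; cases hfs
            | some w => exact ⟨w, rfl⟩
          have h2' : nf.get? k = some fc := h2.trans hfc
          have hdv : ds.getD k 0 = v := by simp [PySem.Dict.getD, hget]
          have hdfv : df.getD k 0 = fc := by simp [PySem.Dict.getD, hfc]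
          have hstep : pvStepA (ns, nf, np) k =
              ((ns.insert pvMisc (ns.getD pvMisc 0 + v)).erase k,
               (nf.insert pvMisc (nf.getD pvMisc 0 + fc)).erase k,
               if np.contains k then np.erase k else np) := by
            simp [pvStepA, hsw, hswc, h1, hget, h2', hv, pvMisc]
          rw [hstep, List.filter_cons_of_pos hpm, List.foldl_cons, List.foldl_cons,
            List.foldl_cons, hdv, hdfv]
          apply ih _ _ _ (List.Nodup.of_cons hnd)
          · intro a ha hb
            have hak : a ≠ k := by
              rintro rfl
              exact (List.nodup_cons.1 hnd).1 ha
            have ham : a ≠ pvMisc := pv_uc_ne_misc hb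
            obtain ⟨g1, g2⟩ := hs a (List.mem_cons_of_mem _ ha) hb
            constructor
            · rw [pv_get?_erase_of_ne hak, PySem.Dict.get?_insert_of_ne _ _ ham, g1]
            · rw [pv_get?_erase_of_ne hak, PySem.Dict.get?_insert_of_ne _ _ ham, g2]
          · intro a ha hb
            exact hf a (List.mem_cons_of_mem _ ha) hb
        · have hstep : pvStepA (ns, nf, np) k = (ns, nf, np) := by
            simp [pvStepA, hsw, hswc, h1, hget, hv]
          have hpm : pvPM ds k = false := by simp [pvPM, hget, hv]
          rw [hstep, List.filter_cons_of_neg (by simp [hpm])]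
          exact ih ns nf np (List.Nodup.of_cons hnd)
            (fun a ha hb => hs a (List.mem_cons_of_mem _ ha) hb)
            (fun a ha hb => hf a (List.mem_cons_of_mem _ ha) hb)
    · have hswf : PySem.Str.startswith k "Unclassified Classes:" = false :=
        Bool.eq_false_iff.mpr hsw
      have hswfc := hswf
      simp at hswfc
      have hstep : pvStepA (ns, nf, np) k = (ns, nf, np) := by
        simp [pvStepA, hswf, hswfc]
      have hpm : pvPM ds k = false := by simp [pvPM, hswf, hswfc]
      rw [hstep, List.filter_cons_of_neg (by simp [hpm])]
      exact ih ns nf np (List.Nodup.of_cons hnd)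
        (fun a ha hb => hs a (List.mem_cons_of_mem _ ha) hb)
        (fun a ha hb => hf a (List.mem_cons_of_mem _ ha) hb)

-- canonical form of the merge fold on one dict
theorem pv_fold_merge (M : List String) (d : PySem.Dict String Int) (val : String → Int)
    (hnd : d.keys.Nodup) (hM : M.Nodup) (hmisc : ∀ k ∈ M, k ≠ pvMisc) :
    (M.foldl (fun d k => (d.insert pvMisc (d.getD pvMisc 0 + val k)).erase k) d).items
    = if M = [] then d.items else
        (d.items.filter (fun kv => !(M.contains kv.1))).map (pvBump ((M.map val).sum))
        ++ (if d.contains pvMisc then [] else [(pvMisc, (M.map val).sum)]) := by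
  induction M generalizing d with
  | nil => simp
  | cons k M' ih =>
    have hk := hmisc k (by simp)
    set d1 : PySem.Dict String Int :=
      (d.insert pvMisc (d.getD pvMisc 0 + val k)).erase k with hd1
    have hnd1 : d1.keys.Nodup := pv_nodup_keys_erase (PySem.Dict.nodup_keys_insert _ _ _ hnd)
    have hc1 : d1.contains pvMisc = true := by
      rw [hd1, pv_contains_erase_of_ne (Ne.symm hk)]
      exact PySem.Dict.contains_insert_self _ _ _
    have hitems1 : d1.items =
        if d.contains pvMisc then
          (d.items.filter (fun p => !(p.1 == k))).map (pvBump (val k))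
        else
          d.items.filter (fun p => !(p.1 == k)) ++ [(pvMisc, (0 : Int) + val k)] := by
      by_cases hc : d.contains pvMisc = true
      · rw [if_pos hc, hd1]
        show (((d.insert pvMisc (d.getD pvMisc 0 + val k)).items).filter _) = _
        rw [PySem.Dict.items_insert_of_contains _ _ hc, List.filter_map]
        have hpred : ((fun p : String × Int => !(p.1 == k)) ∘
            (fun p : String × Int => if (p.1 == pvMisc) = true then (pvMisc, d.getD pvMisc 0 + val k) else p))
            = fun p => !(p.1 == k) := by
          funext p
          by_cases hp : p.1 = pvMisc <;> simp [hp, Function.comp, Ne.symm hk]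
        rw [hpred]
        apply List.map_congr_left
        intro p hp
        have hpmem : p ∈ d.items := List.mem_of_mem_filter hp
        by_cases hpm : p.1 = pvMisc
        · have hg : d.get? pvMisc = some p.2 := by
            have := PySem.Dict.get?_of_mem_items d (k := p.1) (v := p.2) (by simpa using hpmem) hnd
            rwa [hpm] at this
          simp [pvBump, hpm, PySem.Dict.getD, hg]
        · simp [pvBump, hpm]
      · rw [if_neg hc, hd1]
        show (((d.insert pvMisc (d.getD pvMisc 0 + val k)).items).filter _) = _
        rw [PySem.Dict.items_insert_of_not_contains _ _ (by simpa using hc),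
          List.filter_append,
          PySem.Dict.getD_of_not_contains _ _ (by simpa using hc)]
        simp [Ne.symm hk]
    rw [List.foldl_cons, ← hd1, ih d1 hnd1 (List.Nodup.of_cons hM)
      (fun a ha => hmisc a (List.mem_cons_of_mem _ ha))]
    rw [if_neg (by simp : ¬(k :: M' = []))]
    have hpredM : (fun p : String × Int => (!(M'.contains p.1) && !(p.1 == k)))
        = fun p : String × Int => !((k :: M').contains p.1) := by
      funext p
      simp [Bool.not_or, Bool.and_comm, beq_eq_decide]
    have huni : (if M' = [] then d1.items else
        (d1.items.filter (fun kv => !(M'.contains kv.1))).map (pvBump ((M'.map val).sum))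
        ++ (if d1.contains pvMisc then [] else [(pvMisc, (M'.map val).sum)]))
        = (d1.items.filter (fun kv => !(M'.contains kv.1))).map (pvBump ((M'.map val).sum)) := by
      by_cases hM' : M' = []
      · subst hM'
        rw [if_pos rfl, List.filter_eq_self.2 (by intro a _; simp)]
        rw [List.map_congr_left (g := id) (fun p _ => ?_), List.map_id]
        by_cases hpm : p.1 = pvMisc
        · simp only [pvBump, List.map_nil, List.sum_nil, if_pos hpm, add_zero, id_eq]
          rw [← hpm]
        · simp [pvBump, hpm]
      · rw [if_neg hM', hc1]
        simp
    rw [huni, hitems1]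
    by_cases hc : d.contains pvMisc = true
    · rw [if_pos hc, if_pos hc, List.append_nil, List.filter_map]
      have hpred2 : ((fun kv : String × Int => !(M'.contains kv.1)) ∘ pvBump (val k))
          = fun kv : String × Int => !(M'.contains kv.1) := by
        funext p
        by_cases hp : p.1 = pvMisc <;> simp [pvBump, hp, Function.comp]
      rw [hpred2, List.filter_filter, hpredM, List.map_map]
      apply List.map_congr_left
      intro p hp
      by_cases hpm : p.1 = pvMisc
      · simp [Function.comp, pvBump, hpm, add_assoc]
      · simp [Function.comp, pvBump, hpm]
    · rw [if_neg hc, if_neg hc, List.filter_append, List.map_append]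
      have hmiscM' : pvMisc ∉ M' := fun h => hmisc pvMisc (List.mem_cons_of_mem _ h) rfl
      have htail : List.filter (fun kv : String × Int => !(M'.contains kv.1)) [(pvMisc, (0:Int) + val k)]
          = [(pvMisc, (0:Int) + val k)] := by
        simp [hmiscM']
      rw [htail, List.filter_filter, hpredM]
      congr 1
      · apply List.map_congr_left
        intro p hp
        have hne : p.1 ≠ pvMisc := pv_not_contains_key (by simpa using hc) p (List.mem_of_mem_filter hp)
        simp [pvBump, hne]
      · simp [pvBump, add_assoc]

theorem pv_fold_np (M : List String) (d : PySem.Dict String Int) :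
    ((M.foldl (fun d k => if d.contains k then d.erase k else d) d)).items
      = d.items.filter (fun kv => !(M.contains kv.1)) := by
  induction M generalizing d with
  | nil => simp
  | cons k M' ih =>
    have hstep : (if d.contains k then d.erase k else d).items
        = d.items.filter (fun p => !(p.1 == k)) := by
      by_cases hc : d.contains k = true
      · simp [hc, PySem.Dict.erase]
      · rw [if_neg hc]
        simp only [PySem.Dict.contains, List.any_eq_true, not_exists] at hc
        push_neg at hc
        refine (List.filter_eq_self.2 ?_).symm
        intro a ha
        simpa using hc a ha
    simp only [List.foldl_cons, ih, hstep, List.filter_filter]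
    apply List.filter_congr
    intro a _
    simp [Bool.not_or, Bool.and_comm, beq_eq_decide]

theorem pv_keys_filter (s : List (String × Int)) (hnd : (s.map Prod.fst).Nodup) :
    ((PySem.Dict.mk s).keys.filter (pvPM (PySem.Dict.mk s)))
      = (s.filter pvIsSmallUC).map Prod.fst := by
  have h1 : (PySem.Dict.mk s).keys = s.map Prod.fst := rfl
  rw [h1, List.filter_map]
  congr 1
  apply List.filter_congr
  intro kv hkv
  have hmem : (kv.1, kv.2) ∈ (PySem.Dict.mk s).items := by simpa using hkv
  have hnd' : (PySem.Dict.mk s).keys.Nodup := by rw [h1]; exact hnd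
  have hget := PySem.Dict.get?_of_mem_items (PySem.Dict.mk s) hmem hnd'
  simp [Function.comp, pvPM, pvIsSmallUC, hget]

-- B's insert-into-the-filtered-dict, put into the same canonical form
theorem pv_insert_canon (l : List (String × Int)) (q : String × Int → Bool) (T : Int)
    (hnd : (l.map Prod.fst).Nodup) (hq : ∀ p : String × Int, p.1 = pvMisc → q p = true) :
    ((PySem.Dict.mk (l.filter q)).insert pvMisc
        ((PySem.Dict.mk (l.filter q)).getD pvMisc 0 + T)).items
    = (l.filter q).map (pvBump T)
      ++ (if (PySem.Dict.mk l).contains pvMisc then [] else [(pvMisc, T)]) := by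
  have hfind : List.find? (fun p : String × Int => p.1 == pvMisc) (l.filter q)
      = List.find? (fun p : String × Int => p.1 == pvMisc) l := by
    rw [List.find?_filter]
    congr 1
    funext a
    by_cases ha : a.1 = pvMisc
    · simp [ha, hq a ha]
    · simp [ha]
  have hget : (PySem.Dict.mk (l.filter q)).get? pvMisc = (PySem.Dict.mk l).get? pvMisc := by
    simp only [PySem.Dict.get?, hfind]
  have hcon : (PySem.Dict.mk (l.filter q)).contains pvMisc = (PySem.Dict.mk l).contains pvMisc := by
    rw [PySem.Dict.contains_eq_isSome_get?, PySem.Dict.contains_eq_isSome_get?, hget]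
  have hndf : (PySem.Dict.mk (l.filter q)).keys.Nodup := by
    show ((l.filter q).map (fun x => x.1)).Nodup
    exact ((List.filter_sublist (l := l)).map _).nodup hnd
  by_cases hc : (PySem.Dict.mk l).contains pvMisc = true
  · rw [if_pos hc, List.append_nil,
      PySem.Dict.items_insert_of_contains _ _ (hcon.trans hc)]
    apply List.map_congr_left
    intro p hp
    by_cases hpm : p.1 = pvMisc
    · have hg : (PySem.Dict.mk (l.filter q)).get? pvMisc = some p.2 := by
        have := PySem.Dict.get?_of_mem_items (PySem.Dict.mk (l.filter q))
          (k := p.1) (v := p.2) (by simpa using hp) hndf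
        rwa [hpm] at this
      simp [pvBump, hpm, PySem.Dict.getD, hg]
    · simp [pvBump, hpm]
  · rw [if_neg hc,
      PySem.Dict.items_insert_of_not_contains _ _ (by rw [hcon]; exact Bool.eq_false_iff.mpr hc),
      PySem.Dict.getD_of_not_contains _ _ (by rw [hcon]; exact Bool.eq_false_iff.mpr hc)]
    congr 1
    · rw [List.map_congr_left (g := id) (fun p hp => ?_), List.map_id]
      have hne : p.1 ≠ pvMisc := by
        intro hpm
        have : (PySem.Dict.mk l).contains pvMisc = true := by
          simp only [PySem.Dict.contains, List.any_eq_true]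
          exact ⟨p, List.mem_of_mem_filter hp, by simp [hpm]⟩
        exact hc this
      simp [pvBump, hne]
    · simp

-- ===== VERDICT (by name: the statement is the Claim_ definition above) =====
theorem consolidate_categories_spec : Claim_equal_consolidate_categories := by
  intro s f p _hdom hpre
  obtain ⟨h1, h2, h3, h4⟩ := hpre
  unfold Spec_consolidate_categories
  have hnds : (PySem.Dict.mk s).keys.Nodup := h1
  have hndf : (PySem.Dict.mk f).keys.Nodup := h2
  have hf : ∀ k ∈ (PySem.Dict.mk s).keys, pvPM (PySem.Dict.mk s) k = true →
      ((PySem.Dict.mk f).get? k).isSome := by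
    intro k _hk hpm
    simp only [pvPM, Bool.and_eq_true] at hpm
    obtain ⟨hsw, helim⟩ := hpm
    cases hget : (PySem.Dict.mk s).get? k with
    | none => rw [hget] at helim; cases helim
    | some v =>
      rw [hget] at helim
      have hvlt : (v < 10240) := by simpa using helim
      have hmem : (k, v) ∈ (PySem.Dict.mk s).items :=
        PySem.Dict.mem_items_of_get?_eq_some _ hget
      have hkf : k ∈ f.map Prod.fst := h4 (k, v) (by simpa using hmem)
        (by show (PySem.Str.startswith k "Unclassified Classes:" && decide (v < 10240)) = true
            rw [hsw]; simp [hvlt])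
      cases hdfk : (PySem.Dict.mk f).get? k with
      | some w => simp
      | none =>
        exfalso
        have : k ∉ (PySem.Dict.mk f).keys :=
          (PySem.Dict.get?_eq_none_iff_not_mem_keys _ _).1 hdfk
        exact this hkf
  have hloop := pv_loopA (PySem.Dict.mk s) (PySem.Dict.mk f) (PySem.Dict.mk s).keys
    (PySem.Dict.mk s) (PySem.Dict.mk f) (PySem.Dict.mk p) hnds
    (fun k _ _ => ⟨rfl, rfl⟩) hf
  have hM := pv_keys_filter s h1
  have hMnd : ((PySem.Dict.mk s).keys.filter (pvPM (PySem.Dict.mk s))).Nodup := hnds.filter _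
  have hMmisc : ∀ k ∈ (PySem.Dict.mk s).keys.filter (pvPM (PySem.Dict.mk s)), k ≠ pvMisc := by
    intro k hk
    have := (List.mem_filter.1 hk).2
    simp only [pvPM, Bool.and_eq_true] at this
    exact pv_uc_ne_misc this.1
  have hcs := pv_fold_merge ((PySem.Dict.mk s).keys.filter (pvPM (PySem.Dict.mk s)))
    (PySem.Dict.mk s) (fun k => (PySem.Dict.mk s).getD k 0) hnds hMnd hMmisc
  have hcf := pv_fold_merge ((PySem.Dict.mk s).keys.filter (pvPM (PySem.Dict.mk s)))
    (PySem.Dict.mk f) (fun k => (PySem.Dict.mk f).getD k 0) hndf hMnd hMmisc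
  have hcp := pv_fold_np ((PySem.Dict.mk s).keys.filter (pvPM (PySem.Dict.mk s)))
    (PySem.Dict.mk p)
  show ((List.foldl pvStepA (PySem.Dict.mk s, PySem.Dict.mk f, PySem.Dict.mk p) (PySem.Dict.mk s).keys).1.items,
        (List.foldl pvStepA (PySem.Dict.mk s, PySem.Dict.mk f, PySem.Dict.mk p) (PySem.Dict.mk s).keys).2.1.items,
        (List.foldl pvStepA (PySem.Dict.mk s, PySem.Dict.mk f, PySem.Dict.mk p) (PySem.Dict.mk s).keys).2.2.items)
      = consolidate_categories_alt s f p
  rw [hloop]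
  rw [hM] at hcs hcf hcp
  rw [hM]
  simp only [hcs, hcf, hcp]
  have hqmisc : ∀ pr : String × Int, pr.1 = pvMisc →
      (!(((s.filter pvIsSmallUC).map Prod.fst).contains pr.1)) = true := by
    intro pr hpm
    rw [hpm]
    suffices h : pvMisc ∉ (s.filter pvIsSmallUC).map Prod.fst by simp [h]
    intro hmem
    obtain ⟨kv, hkv, hk1⟩ := List.mem_map.1 hmem
    have h5 := (List.mem_filter.1 hkv).2
    simp only [pvIsSmallUC, Bool.and_eq_true] at h5
    exact pv_uc_ne_misc h5.1 hk1
  by_cases hmz : (s.filter pvIsSmallUC).map Prod.fst = []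
  · rw [if_pos hmz, if_pos hmz]
    have hempty : ((s.filter pvIsSmallUC).map Prod.fst).isEmpty = true := by rw [hmz]; rfl
    rw [show consolidate_categories_alt s f p
        = (if ((s.filter pvIsSmallUC).map Prod.fst).isEmpty then
            ((PySem.Dict.mk (s.filter (fun kv => !(((s.filter pvIsSmallUC).map Prod.fst).contains kv.1)))).items,
             (PySem.Dict.mk (f.filter (fun kv => !(((s.filter pvIsSmallUC).map Prod.fst).contains kv.1)))).items,
             p.filter (fun kv => !(((s.filter pvIsSmallUC).map Prod.fst).contains kv.1)))
          else
            (((PySem.Dict.mk (s.filter (fun kv => !(((s.filter pvIsSmallUC).map Prod.fst).contains kv.1)))).insert pvMisc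
                ((PySem.Dict.mk (s.filter (fun kv => !(((s.filter pvIsSmallUC).map Prod.fst).contains kv.1)))).getD pvMisc 0
                  + ((((s.filter pvIsSmallUC).map Prod.fst).map (fun k => PySem.Dict.getD (PySem.Dict.mk s) k 0)).sum))).items,
             ((PySem.Dict.mk (f.filter (fun kv => !(((s.filter pvIsSmallUC).map Prod.fst).contains kv.1)))).insert pvMisc
                ((PySem.Dict.mk (f.filter (fun kv => !(((s.filter pvIsSmallUC).map Prod.fst).contains kv.1)))).getD pvMisc 0
                  + ((((s.filter pvIsSmallUC).map Prod.fst).map (fun k => PySem.Dict.getD (PySem.Dict.mk f) k 0)).sum))).items,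
             p.filter (fun kv => !(((s.filter pvIsSmallUC).map Prod.fst).contains kv.1)))) from rfl]
    rw [if_pos hempty, hmz]
    simp
  · rw [if_neg hmz, if_neg hmz]
    have hempty : ((s.filter pvIsSmallUC).map Prod.fst).isEmpty = false := by
      cases hm : (s.filter pvIsSmallUC).map Prod.fst with
      | nil => exact absurd hm hmz
      | cons a l => rfl
    rw [show consolidate_categories_alt s f p
        = (if ((s.filter pvIsSmallUC).map Prod.fst).isEmpty then
            ((PySem.Dict.mk (s.filter (fun kv => !(((s.filter pvIsSmallUC).map Prod.fst).contains kv.1)))).items,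
             (PySem.Dict.mk (f.filter (fun kv => !(((s.filter pvIsSmallUC).map Prod.fst).contains kv.1)))).items,
             p.filter (fun kv => !(((s.filter pvIsSmallUC).map Prod.fst).contains kv.1)))
          else
            (((PySem.Dict.mk (s.filter (fun kv => !(((s.filter pvIsSmallUC).map Prod.fst).contains kv.1)))).insert pvMisc
                ((PySem.Dict.mk (s.filter (fun kv => !(((s.filter pvIsSmallUC).map Prod.fst).contains kv.1)))).getD pvMisc 0
                  + ((((s.filter pvIsSmallUC).map Prod.fst).map (fun k => PySem.Dict.getD (PySem.Dict.mk s) k 0)).sum))).items,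
             ((PySem.Dict.mk (f.filter (fun kv => !(((s.filter pvIsSmallUC).map Prod.fst).contains kv.1)))).insert pvMisc
                ((PySem.Dict.mk (f.filter (fun kv => !(((s.filter pvIsSmallUC).map Prod.fst).contains kv.1)))).getD pvMisc 0
                  + ((((s.filter pvIsSmallUC).map Prod.fst).map (fun k => PySem.Dict.getD (PySem.Dict.mk f) k 0)).sum))).items,
             p.filter (fun kv => !(((s.filter pvIsSmallUC).map Prod.fst).contains kv.1)))) from rfl]
    have hne : ¬(((s.filter pvIsSmallUC).map Prod.fst).isEmpty = true) := by
      simp [hempty]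
    rw [if_neg hne]
    simp only [Prod.mk.injEq]
    refine ⟨?_, ?_⟩
    · rw [pv_insert_canon s _ _ h1 hqmisc]
    · rw [pv_insert_canon f _ _ h2 hqmisc]
      exact ⟨rfl, trivial⟩
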